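-- pv_equiv track=rewrite | github.com/tracholar/ml-homework-cz | ai-gobang/tracholar/api2.py | eval_row
-- ===== SOURCE A (Python) =====
-- def eval_row(row, role):
--     row = list(row) + [3-role]
--     n = len(row)
--
--     cum_cnt = 0
--     left_live = False # 左侧是否是活棋，第一个肯定不是的
--     value = {}
--     max_cum_cnt = 0
--     for i in range(n):
--         if row[i] == role:  # 是自己的子
--             cum_cnt += 1
--             continue
--         elif row[i] == 0: # 没有子
--             if cum_cnt > 0:
--                 if left_live is True:
--                     k = 'live_' + str(cum_cnt)
--                     value[k] = value.get(k, 0) + 1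
--                 else:
--                     k = 'right_live_' + str(cum_cnt)
--                     value[k] = value.get(k, 0) + 1
--             left_live = True
--             max_cum_cnt = max(max_cum_cnt, cum_cnt)
--             cum_cnt = 0
--             continue
--         else:   # 是对方的子
--             if cum_cnt > 0:
--                 if left_live is True:
--                     k = 'left_live_' + str(cum_cnt)
--                     value[k] = value.get(k, 0) + 1
--                 else:
--                     k = 'dead_' + str(cum_cnt)
--                     value[k] = value.get(k, 0) + 1
--             left_live = False
--             max_cum_cnt = max(max_cum_cnt, cum_cnt)
--             cum_cnt = 0
--             continue
--     return value, max_cum_cnt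
-- ===== SOURCE B (Python) =====
-- from itertools import groupby
--
--
-- def eval_row(row, role):
--     # run-length encode the row plus the opponent sentinel
--     runs = [(v, sum(1 for _ in g)) for v, g in groupby(list(row) + [3 - role])]
--     value = {}
--     max_cum_cnt = 0
--     prev = None
--     # the sentinel guarantees the final run never belongs to role,
--     # so pairing each run with its successor covers every role run
--     for (v, ln), (nv, _) in zip(runs, runs[1:]):
--         if v == role:
--             max_cum_cnt = max(max_cum_cnt, ln)
--             left, right = prev == 0, nv == 0
--             key = ('live_' if left and right else
--                    'left_live_' if left else
--                    'right_live_' if right else 'dead_') + str(ln)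
--             value[key] = value.get(key, 0) + 1
--         prev = v
--     return value, max_cum_cnt
-- ===== Notes on version B (the rewrite author's own statement) =====
-- stated objective: idiomatic
-- what changed: B replaces A's cell-by-cell state machine (cum_cnt/left_live flags with flush-on-boundary) by a groupby run-length encoding followed by one pass over the runs, classifying each role run directly from its neighbouring runs.
import Mathlib
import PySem

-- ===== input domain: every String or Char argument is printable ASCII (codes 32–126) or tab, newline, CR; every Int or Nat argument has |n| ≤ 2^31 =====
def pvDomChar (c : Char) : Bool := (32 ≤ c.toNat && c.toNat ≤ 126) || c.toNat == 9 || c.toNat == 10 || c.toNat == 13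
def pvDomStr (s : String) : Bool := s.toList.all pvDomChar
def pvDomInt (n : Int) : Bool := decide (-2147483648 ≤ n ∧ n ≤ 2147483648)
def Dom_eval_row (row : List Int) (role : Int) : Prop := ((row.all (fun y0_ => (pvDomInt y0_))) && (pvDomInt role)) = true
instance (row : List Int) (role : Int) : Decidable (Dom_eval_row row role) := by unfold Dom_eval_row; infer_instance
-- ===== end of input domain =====

-- B replaces A's cell-by-cell state machine by an idiomatic groupby run-length pass
-- that classifies each role run from its neighbouring runs (objective: idiomatic).

-- ===== PORT A =====
-- state: (cum_cnt, left_live, value, max_cum_cnt)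
def stepA (role : Int) : (Int × Bool × PySem.Dict String Int × Int) → Int →
    (Int × Bool × PySem.Dict String Int × Int)
  | (cum, ll, value, mx), x =>
    if x = role then (cum + 1, ll, value, mx)
    else if x = 0 then
      (0, true,
       (if cum > 0 then
          let k := (if ll then "live_" else "right_live_") ++ PySem.Int.toStr cum
          value.insert k (value.getD k 0 + 1)
        else value),
       max mx cum)
    else
      (0, false,
       (if cum > 0 then
          let k := (if ll then "left_live_" else "dead_") ++ PySem.Int.toStr cum
          value.insert k (value.getD k 0 + 1)
        else value),
       max mx cum)

def eval_row (row : List Int) (role : Int) : (List (String × Int)) × Int :=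
  let cells := row ++ [3 - role]
  let st := cells.foldl (stepA role) (0, false, PySem.Dict.empty, 0)
  (st.2.2.1.items, st.2.2.2)

-- ===== PORT B =====
-- itertools.groupby as (value, length) runs: hand-ported run-length encoding (exact)
def runsOf : List Int → List (Int × Int)
  | [] => []
  | x :: xs =>
    match runsOf xs with
    | [] => [(x, 1)]
    | (v, c) :: rest => if x = v then (v, c + 1) :: rest else (x, 1) :: (v, c) :: rest

-- state: (prev, value, max_cum_cnt)
def stepB (role : Int) : (Option Int × PySem.Dict String Int × Int) →
    ((Int × Int) × (Int × Int)) → (Option Int × PySem.Dict String Int × Int)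
  | (prev, value, mx), ((v, ln), (nv, _)) =>
    if v = role then
      let key := (if prev = some 0 ∧ nv = 0 then "live_"
                  else if prev = some 0 then "left_live_"
                  else if nv = 0 then "right_live_" else "dead_") ++ PySem.Int.toStr ln
      (some v, value.insert key (value.getD key 0 + 1), max mx ln)
    else (some v, value, mx)

def eval_row_alt (row : List Int) (role : Int) : (List (String × Int)) × Int :=
  let runs := runsOf (row ++ [3 - role])
  let st := (runs.zip runs.tail).foldl (stepB role) (none, PySem.Dict.empty, 0)
  (st.2.1.items, st.2.2)

-- ===== PRECONDITION & SPEC =====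
def Spec_eval_row (row : List Int) (role : Int) (out : (List (String × Int)) × Int) : Prop := out = eval_row_alt row role
instance (row : List Int) (role : Int) (out : (List (String × Int)) × Int) : Decidable (Spec_eval_row row role out) := by unfold Spec_eval_row; infer_instance

-- ===== CLAIM (what is proved, stated in full; the proofs are below) =====
def Claim_equal_eval_row : Prop := ∀ (row : List Int) (role : Int), Dom_eval_row row role → Spec_eval_row row role (eval_row row role)

-- ===== LEMMAS AND PROOFS =====
def expandRuns (rs : List (Int × Int)) : List Int :=
  rs.flatMap (fun p => List.replicate p.2.toNat p.1)

lemma runsOf_pos (l : List Int) : ∀ p ∈ runsOf l, 1 ≤ p.2 := by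
  induction l with
  | nil => simp [runsOf]
  | cons x xs ih =>
    simp only [runsOf]
    cases h : runsOf xs with
    | nil => simp
    | cons r rest =>
      obtain ⟨v, c⟩ := r
      have hc := ih (v, c) (by rw [h]; exact List.mem_cons_self)
      by_cases hx : x = v
      · simp only [if_pos hx]
        intro p hp
        rcases List.mem_cons.1 hp with rfl | hp
        · simpa using by omega
        · exact ih p (by rw [h]; exact List.mem_cons_of_mem _ hp)
      · simp only [if_neg hx]
        intro p hp
        rcases List.mem_cons.1 hp with rfl | hp
        · simp
        · exact ih p (by rw [h]; exact hp)

lemma runsOf_chain (l : List Int) : (runsOf l).IsChain (fun p q => p.1 ≠ q.1) := by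
  induction l with
  | nil => exact List.isChain_nil
  | cons x xs ih =>
    simp only [runsOf]
    cases h : runsOf xs with
    | nil => exact List.isChain_singleton _
    | cons r rest =>
      obtain ⟨v, c⟩ := r
      rw [h] at ih
      dsimp only
      by_cases hx : x = v
      · rw [if_pos hx]
        cases rest with
        | nil => exact List.isChain_singleton _
        | cons r2 rest2 =>
          exact List.isChain_cons_cons.2 ⟨(List.isChain_cons_cons.1 ih).1,
            (List.isChain_cons_cons.1 ih).2⟩
      · rw [if_neg hx]
        exact List.isChain_cons_cons.2 ⟨hx, ih⟩

-- IsChain survives dropping the head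
lemma isChain_tail {α : Type} {R : α → α → Prop} {a : α} {l : List α}
    (h : (a :: l).IsChain R) : l.IsChain R := by
  cases l with
  | nil => exact List.isChain_nil
  | cons b m => exact (List.isChain_cons_cons.1 h).2

lemma expand_runsOf (l : List Int) : expandRuns (runsOf l) = l := by
  induction l with
  | nil => simp [runsOf, expandRuns]
  | cons x xs ih =>
    simp only [runsOf]
    cases h : runsOf xs with
    | nil =>
      have hxs : xs = [] := by
        have := ih; rw [h] at this; simpa [expandRuns] using this.symm
      simp [expandRuns, hxs]
    | cons r rest =>
      obtain ⟨v, c⟩ := r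
      have hc : 1 ≤ c := runsOf_pos xs (v, c) (by rw [h]; exact List.mem_cons_self)
      rw [h] at ih
      unfold expandRuns at ih ⊢
      dsimp only
      by_cases hx : x = v
      · subst hx
        rw [if_pos rfl]
        have hta : (c + 1).toNat = c.toNat + 1 := by omega
        simp only [List.flatMap_cons] at ih ⊢
        rw [hta, List.replicate_succ, List.cons_append]
        rw [ih]
      · rw [if_neg hx]
        simp only [List.flatMap_cons] at ih ⊢
        rw [ih]
        simp

lemma foldA_replicate_role (role : Int) (k : Nat) :
    ∀ cum ll value mx, List.foldl (stepA role) (cum, ll, value, mx) (List.replicate k role)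
      = (cum + (k : Int), ll, value, mx) := by
  induction k with
  | zero => intro cum ll value mx; simp
  | succ n ih =>
    intro cum ll value mx
    rw [List.replicate_succ, List.foldl_cons]
    simp only [stepA, reduceIte]
    rw [ih]
    congr 1
    push_cast
    ring

lemma foldA_replicate_nonrole (role v : Int) (hv : v ≠ role) (k : Nat) :
    ∀ (value : PySem.Dict String Int) (mx : Int), 0 ≤ mx →
      List.foldl (stepA role) (0, decide (v = 0), value, mx) (List.replicate k v)
        = ((0 : Int), decide (v = 0), value, mx) := by
  induction k with
  | zero => intro value mx _; simp
  | succ n ih =>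
    intro value mx hmx
    rw [List.replicate_succ, List.foldl_cons]
    have hstep : stepA role ((0 : Int), decide (v = 0), value, mx) v
        = ((0 : Int), decide (v = 0), value, mx) := by
      by_cases h0 : v = 0
      · subst h0
        simp [stepA, hv, max_eq_left hmx]
      · simp [stepA, hv, h0, max_eq_left hmx]
    rw [hstep]
    exact ih value mx hmx

-- one non-role run of positive length, entered with cum = 0: no flush, left_live becomes (v = 0)
lemma foldA_run_nonrole_zero (role v : Int) (hv : ¬ v = role) (k : Nat) (hk : 1 ≤ k)
    (ll : Bool) (value : PySem.Dict String Int) (mx : Int) (hmx : 0 ≤ mx) :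
    List.foldl (stepA role) (0, ll, value, mx) (List.replicate k v)
      = ((0 : Int), decide (v = 0), value, mx) := by
  obtain ⟨n, rfl⟩ : ∃ n, k = n + 1 := ⟨k - 1, by omega⟩
  rw [List.replicate_succ, List.foldl_cons]
  have hstep : stepA role ((0 : Int), ll, value, mx) v = ((0 : Int), decide (v = 0), value, mx) := by
    by_cases h0 : v = 0
    · subst h0
      simp [stepA, hv, max_eq_left hmx]
    · simp [stepA, hv, h0, max_eq_left hmx]
  rw [hstep]
  exact foldA_replicate_nonrole role v hv n value mx hmx

-- main invariant: A over the expanded runs ≍ B over successor pairs of runs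
lemma main_inv (role : Int) (runs : List (Int × Int))
    (hpos : ∀ p ∈ runs, 1 ≤ p.2) (hch : runs.IsChain (fun p q => p.1 ≠ q.1)) :
    ∀ (prev : Option Int) (value : PySem.Dict String Int) (mx : Int), 0 ≤ mx →
      (let a := List.foldl (stepA role) (0, decide (prev = some 0), value, mx) (expandRuns runs)
       let b := List.foldl (stepB role) (prev, value, mx) (runs.zip runs.tail)
       (a.2.2.1, a.2.2.2) = (b.2.1, b.2.2)) := by
  induction runs with
  | nil => intro prev value mx hmx; simp [expandRuns]
  | cons r rest ih =>
    obtain ⟨v, c⟩ := r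
    intro prev value mx hmx
    have hc : 1 ≤ c := hpos (v, c) List.mem_cons_self
    have hpos' : ∀ p ∈ rest, 1 ≤ p.2 := fun p hp => hpos p (List.mem_cons_of_mem _ hp)
    have hch' : rest.IsChain (fun p q => p.1 ≠ q.1) := isChain_tail hch
    have hexp : expandRuns ((v, c) :: rest) = List.replicate c.toNat v ++ expandRuns rest := by
      simp [expandRuns]
    simp only [hexp, List.foldl_append]
    by_cases hv : v = role
    · -- a role run
      rw [hv]
      rw [foldA_replicate_role]
      rw [show (0 + ((c.toNat : Int))) = c from by omega]
      cases rest with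
      | nil =>
        -- last run: A leaves (value, mx) untouched past the role cells; B has no pair
        simp [expandRuns]
      | cons r2 rest2 =>
        obtain ⟨w, d⟩ := r2
        have hvw : v ≠ w := (List.isChain_cons_cons.1 hch).1
        have hw : ¬ w = role := fun hh => hvw (hv.trans hh.symm)
        have hd : 1 ≤ d := hpos' (w, d) List.mem_cons_self
        have hexp2 : expandRuns ((w, d) :: rest2)
            = List.replicate d.toNat w ++ expandRuns rest2 := by simp [expandRuns]
        obtain ⟨m, hm⟩ : ∃ m, d.toNat = m + 1 := ⟨d.toNat - 1, by omega⟩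
        have hcpos : (0 : Int) < c := by omega
        set K : String :=
          (if w = 0 then (if decide (prev = some 0) then "live_" else "right_live_")
           else (if decide (prev = some 0) then "left_live_" else "dead_"))
            ++ PySem.Int.toStr c with hK
        -- A: the first cell of the w-run flushes the role run
        have hflush :
            List.foldl (stepA role) (c, decide (prev = some 0), value, mx)
              (expandRuns ((w, d) :: rest2))
            = List.foldl (stepA role) (0, decide (w = 0),
                value.insert K (value.getD K 0 + 1), max mx c) (expandRuns rest2) := by
          rw [hexp2, List.foldl_append, hm, List.replicate_succ, List.foldl_cons]
          have hstep : stepA role (c, decide (prev = some 0), value, mx) w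
              = ((0 : Int), decide (w = 0),
                 value.insert K (value.getD K 0 + 1), max mx c) := by
            by_cases h0 : w = 0
            · subst h0
              simp [stepA, hw, hcpos, hK]
            · simp [stepA, hw, h0, hcpos, hK]
          rw [hstep,
            foldA_replicate_nonrole role w hw m _ _ (le_max_of_le_right hcpos.le)]
        rw [hflush]
        -- B: the pair ((role,c),(w,d)) performs the same insertion
        have hzip : (((role, c) :: (w, d) :: rest2).zip (((role, c) :: (w, d) :: rest2).tail))
            = ((role, c), (w, d)) :: (((w, d) :: rest2).zip (((w, d) :: rest2).tail)) := by
          simp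
        rw [hzip, List.foldl_cons]
        have hstepB : stepB role (prev, value, mx) ((role, c), (w, d))
            = (some role, value.insert K (value.getD K 0 + 1), max mx c) := by
          by_cases hp : prev = some 0 <;> by_cases h0 : w = 0 <;>
            simp [stepB, hp, h0, hK]
        rw [hstepB]
        -- IH on (w,d)::rest2 with prev := some role: its first (non-role) run only
        -- turns left_live into (w = 0), which is exactly the state A has reached
        have hIH := ih hpos' hch' (some role) (value.insert K (value.getD K 0 + 1)) (max mx c)
          (le_max_of_le_right hcpos.le)
        simp only [hexp2, List.foldl_append] at hIH
        rw [foldA_run_nonrole_zero role w hw d.toNat (by omega) _ _ _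
          (le_max_of_le_right hcpos.le)] at hIH
        exact hIH
    · -- a non-role run: A records left_live := (v = 0); B records prev := v
      rw [foldA_run_nonrole_zero role v hv c.toNat (by omega) _ _ _ hmx]
      have hIH := ih hpos' hch' (some v) value mx hmx
      have hbv : decide ((some v : Option Int) = some 0) = decide (v = 0) := by simp
      rw [hbv] at hIH
      cases rest with
      | nil => simpa using hIH
      | cons r2 rest2 =>
        have hzip : (((v, c) :: r2 :: rest2).zip (((v, c) :: r2 :: rest2).tail))
            = ((v, c), r2) :: ((r2 :: rest2).zip ((r2 :: rest2).tail)) := by simp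
        rw [hzip, List.foldl_cons]
        have hB : stepB role (prev, value, mx) ((v, c), r2) = (some v, value, mx) := by
          obtain ⟨nv, nd⟩ := r2
          simp [stepB, hv]
        rw [hB]
        exact hIH

-- ===== VERDICT (by name: the statement is the Claim_ definition above) =====
theorem eval_row_spec : Claim_equal_eval_row := by
  intro row role _
  unfold Spec_eval_row eval_row eval_row_alt
  have h := main_inv role (runsOf (row ++ [3 - role]))
    (runsOf_pos _) (runsOf_chain _) none PySem.Dict.empty 0 le_rfl
  simp only [expand_runsOf] at h
  simp only at h ⊢
  have h1 := congrArg Prod.fst h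
  have h2 := congrArg Prod.snd h
  simp only at h1 h2
  rw [show decide ((none : Option Int) = some 0) = false by simp] at h1 h2
  rw [h1, h2]
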